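-- pv_equiv track=rewrite | github.com/image-science-laboratory/cordility-sugimizu | lesson4/4-1.py | solution
-- ===== SOURCE A (Python) =====
-- def solution(X, A):
--     data = {}
--
--     for i in range(len(A)):
--         if A[i] not in data:
--             data[str(A[i])] = 1
--
--         if len(data) == X:
--             return i
--
--     return -1
-- ===== SOURCE B (Python) =====
-- def solution(X, A):
--     # Build the ordered table of first-occurrence indices, then index into it.
--     seen = set()
--     firsts = []
--     for i, v in enumerate(A):
--         if v not in seen:
--             seen.add(v)
--             firsts.append(i)
--     return firsts[X - 1] if 0 < X <= len(firsts) else -1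
-- ===== Notes on version B (the rewrite author's own statement) =====
-- stated objective: alternative
-- what changed: Instead of early-returning inside the loop when the dict of seen values reaches size X, B does one full pass collecting the ordered list of first-occurrence indices into a set-plus-list and then answers by indexing firsts[X-1] under a bounds guard; A's per-element str(A[i]) conversion and string-keyed dict disappear.
import Mathlib
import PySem

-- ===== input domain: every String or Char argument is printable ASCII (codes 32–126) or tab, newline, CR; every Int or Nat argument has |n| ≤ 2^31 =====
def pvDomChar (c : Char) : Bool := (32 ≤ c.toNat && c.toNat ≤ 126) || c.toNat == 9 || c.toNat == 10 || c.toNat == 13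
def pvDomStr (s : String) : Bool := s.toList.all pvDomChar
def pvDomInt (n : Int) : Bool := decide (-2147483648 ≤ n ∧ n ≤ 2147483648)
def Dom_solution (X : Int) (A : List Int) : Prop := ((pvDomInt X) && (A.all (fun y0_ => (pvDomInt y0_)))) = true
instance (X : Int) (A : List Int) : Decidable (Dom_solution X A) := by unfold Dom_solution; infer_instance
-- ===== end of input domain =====

-- B replaces A's early-return-on-dict-size loop by one pass that collects the ordered
-- first-occurrence indices and then indexes into that table (alternative decomposition, same cost).


-- ===== PORT A =====
-- Python's dict here receives int keys in its membership test ('A[i] not in data') but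
-- str keys on insertion ('data[str(A[i])] = 1'); the key type of the port is therefore a
-- tagged union of the two Python key types, compared exactly as Python compares them
-- (an int key never equals a str key).
inductive PvKey
  | ofInt : Int → PvKey
  | ofStr : String → PvKey
deriving DecidableEq, Repr

-- the loop 'for i in range(len(A)): … A[i] …' iterated over (index, A[i]) pairs,
-- with Python's early 'return i' as the first non-recursive branch
def pvLoopA (X : Int) : List (Int × Int) → PySem.Dict PvKey Int → Int
  | [], _ => -1
  | (i, v) :: rest, data =>
    let data' := if data.contains (PvKey.ofInt v) then data
                 else data.insert (PvKey.ofStr (PySem.Int.toStr v)) 1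
    if (data'.size : Int) = X then i else pvLoopA X rest data'

def solution (X : Int) (A : List Int) : Int :=
  pvLoopA X (PySem.List.enumerate A) PySem.Dict.empty

-- ===== PORT B =====
-- one pass: 'seen' set plus the list 'firsts' of first-occurrence indices
def pvLoopB : List (Int × Int) → PySem.Set Int → List Int → List Int
  | [], _, firsts => firsts
  | (i, v) :: rest, seen, firsts =>
    if PySem.Set.contains seen v then pvLoopB rest seen firsts
    else pvLoopB rest (PySem.Set.add seen v) (firsts ++ [i])

def solution_alt (X : Int) (A : List Int) : Int :=
  let firsts := pvLoopB (PySem.List.enumerate A) PySem.Set.empty []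
  if 0 < X ∧ X ≤ (firsts.length : Int) then (PySem.List.pyGet? firsts (X - 1)).getD (-1)
  else -1

-- ===== PRECONDITION & SPEC =====
def Spec_solution (X : Int) (A : List Int) (out : Int) : Prop := out = solution_alt X A
instance (X : Int) (A : List Int) (out : Int) : Decidable (Spec_solution X A out) := by unfold Spec_solution; infer_instance

-- ===== CLAIM (what is proved, stated in full; the proofs are below) =====
def Claim_equal_solution : Prop := ∀ (X : Int) (A : List Int), Dom_solution X A → Spec_solution X A (solution X A)

-- ===== LEMMAS AND PROOFS =====

-- str(n) is injective: first, reading the decimal digit string back.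
lemma pv_val_toDigits (n : Nat) : ∀ a : Nat,
    (Nat.toDigits 10 n).foldl (fun acc c => 10 * acc + (c.toNat - 48)) a
      = a * 10 ^ (Nat.toDigits 10 n).length + n := by
  induction n using Nat.strong_induction_on with
  | _ n ih =>
    intro a
    by_cases h : n < 10
    · rw [Nat.toDigits_of_lt_base h]
      have hd : (Nat.digitChar n).toNat - 48 = n := by interval_cases n <;> decide
      simp [List.foldl, hd]; ring
    · rw [Nat.toDigits_of_base_le (by norm_num) (by omega)]
      have hlt : n / 10 < n := Nat.div_lt_self (by omega) (by norm_num)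
      have hm : n % 10 < 10 := Nat.mod_lt _ (by norm_num)
      have hd : (Nat.digitChar (n % 10)).toNat - 48 = n % 10 := by
        interval_cases h : n % 10 <;> decide
      rw [List.foldl_append, ih _ hlt a]
      simp [List.foldl, hd, List.length_append, pow_succ]
      have := Nat.div_add_mod n 10
      ring_nf
      omega

lemma pv_toDigits_inj {m n : Nat} (h : Nat.toDigits 10 m = Nat.toDigits 10 n) : m = n := by
  have hm := pv_val_toDigits m 0
  have hn := pv_val_toDigits n 0
  rw [h] at hm
  omega

lemma pv_toStr_inj {m n : Int} (h : PySem.Int.toStr m = PySem.Int.toStr n) : m = n := by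
  have hc : PySem.Int.toChars m = PySem.Int.toChars n := by
    have := congrArg String.toList h
    simpa [PySem.Int.toList_toStr] using this
  unfold PySem.Int.toChars at hc
  split_ifs at hc with h1 h2 h2
  · -- both negative
    have : Nat.toDigits 10 m.natAbs = Nat.toDigits 10 n.natAbs := by
      simpa using hc
    have := pv_toDigits_inj this
    omega
  · -- m < 0, 0 ≤ n : '-' would have to be a digit
    have hmem : '-' ∈ Nat.toDigits 10 n.toNat := by
      rw [← hc]; exact List.mem_cons_self ..
    have := Nat.isDigit_of_mem_toDigits (by norm_num) (by norm_num) hmem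
    simp [Char.isDigit] at this
  · have hmem : '-' ∈ Nat.toDigits 10 m.toNat := by
      rw [hc]; exact List.mem_cons_self ..
    have := Nat.isDigit_of_mem_toDigits (by norm_num) (by norm_num) hmem
    simp [Char.isDigit] at this
  · have := pv_toDigits_inj hc
    omega

-- B's accumulator only ever grows: the firsts argument is a prefix of the result.
lemma pvLoopB_acc (l : List (Int × Int)) : ∀ (seen : PySem.Set Int) (firsts : List Int),
    pvLoopB l seen firsts = firsts ++ pvLoopB l seen [] := by
  induction l with
  | nil => intro seen firsts; simp [pvLoopB]
  | cons p rest ih =>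
    intro seen firsts
    obtain ⟨i, v⟩ := p
    simp only [pvLoopB]
    by_cases h : PySem.Set.contains seen v = true
    · rw [if_pos h, if_pos h, ih]
    · rw [if_neg h, if_neg h, ih _ (firsts ++ [i]), ih _ ([] ++ [i])]
      simp

-- a dict's size is the length of its key list
lemma pv_size_keys (d : PySem.Dict PvKey Int) : d.size = d.keys.length := by
  simp [PySem.Dict.size, PySem.Dict.keys]

-- Main loop correspondence, under the invariant tying A's dict to B's seen/firsts.
lemma pv_loop_eq (X : Int) (l : List (Int × Int)) : ∀ (data : PySem.Dict PvKey Int)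
    (seen : PySem.Set Int) (firsts : List Int),
    data.keys = seen.map (fun v => PvKey.ofStr (PySem.Int.toStr v)) →
    firsts.length = seen.length →
    (firsts.length : Int) < X →
    pvLoopA X l data =
      (if X ≤ ((pvLoopB l seen firsts).length : Int) then
        (PySem.List.pyGet? (pvLoopB l seen firsts) (X - 1)).getD (-1)
       else -1) := by
  induction l with
  | nil =>
    intro data seen firsts hkeys hlen hlt
    simp only [pvLoopA, pvLoopB]
    rw [if_neg (not_le.mpr hlt)]
  | cons p rest ih =>
    intro data seen firsts hkeys hlen hlt
    obtain ⟨i, v⟩ := p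
    simp only [pvLoopA, pvLoopB]
    have hinl : data.contains (PvKey.ofInt v) = false := by
      rw [PySem.Dict.contains_eq_decide_mem_keys, hkeys]
      simp
    rw [hinl]
    simp only [Bool.false_eq_true, if_false]
    by_cases hv : v ∈ seen
    · -- duplicate value: the str key is already present, size is unchanged
      have hcont : data.contains (PvKey.ofStr (PySem.Int.toStr v)) = true := by
        rw [PySem.Dict.contains_eq_decide_mem_keys, hkeys]
        simp only [decide_eq_true_eq, List.mem_map]
        exact ⟨v, hv, rfl⟩
      have hkeys' : (data.insert (PvKey.ofStr (PySem.Int.toStr v)) 1).keys = data.keys :=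
        PySem.Dict.keys_insert_of_contains data 1 hcont
      have hsize : ((data.insert (PvKey.ofStr (PySem.Int.toStr v)) 1).size : Int) ≠ X := by
        rw [pv_size_keys, hkeys', hkeys, List.length_map, ← hlen]
        omega
      rw [if_neg hsize, if_pos ((PySem.Set.contains_iff seen v).mpr hv)]
      exact ih _ seen firsts (by rw [hkeys', hkeys]) hlen hlt
    · -- fresh value: the str key is new (str is injective), size grows by one
      have hcont : data.contains (PvKey.ofStr (PySem.Int.toStr v)) = false := by
        rw [PySem.Dict.contains_eq_decide_mem_keys, hkeys]
        simp only [decide_eq_false_iff_not, List.mem_map, not_exists]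
        rintro w ⟨hw, he⟩
        exact hv (by rwa [pv_toStr_inj (PvKey.ofStr.inj he)] at hw)
      have hkeys' : (data.insert (PvKey.ofStr (PySem.Int.toStr v)) 1).keys
          = data.keys ++ [PvKey.ofStr (PySem.Int.toStr v)] :=
        PySem.Dict.keys_insert_of_not_contains data 1 hcont
      have hsize : ((data.insert (PvKey.ofStr (PySem.Int.toStr v)) 1).size : Int)
          = (firsts.length : Int) + 1 := by
        rw [pv_size_keys, hkeys', hkeys]
        simp [← hlen]
      have hnc : ¬ PySem.Set.contains seen v = true := by
        rw [PySem.Set.contains_iff]; exact hv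
      rw [if_neg hnc]
      have hadd : PySem.Set.add seen v = seen ++ [v] := PySem.Set.add_of_not_mem hv
      have hacc := pvLoopB_acc rest (PySem.Set.add seen v) (firsts ++ [i])
      by_cases hX : (firsts.length : Int) + 1 = X
      · -- this is the X-th distinct value: A returns i, B's table has i at slot X-1
        rw [if_pos (by rw [hsize, hX])]
        rw [hacc]
        have hlenge : X ≤ (((firsts ++ [i]) ++ pvLoopB rest (PySem.Set.add seen v) []).length : Int) := by
          simp only [List.length_append, List.length_cons, List.length_nil]
          push_cast
          omega
        rw [if_pos hlenge]
        have hidx : X - 1 = ((firsts.length : Nat) : Int) := by omega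
        rw [hidx, PySem.List.pyGet?_natCast]
        have hbound : firsts.length < ((firsts ++ [i]) ++ pvLoopB rest (PySem.Set.add seen v) []).length := by
          simp only [List.length_append, List.length_cons, List.length_nil]
          omega
        rw [List.getElem?_eq_getElem hbound]
        rw [List.getElem_append_left (by simp)]
        rw [List.getElem_concat_length rfl]
        rfl
      · -- not yet the X-th distinct value: recurse
        rw [if_neg (by rw [hsize]; exact hX)]
        refine ih _ (PySem.Set.add seen v) (firsts ++ [i]) ?_ ?_ ?_
        · rw [hkeys', hkeys, hadd]
          simp
        · simp [hadd, hlen]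
        · simp only [List.length_append, List.length_cons, List.length_nil]
          push_cast
          omega

-- X ≤ 0 : A never sees len(data) == X (the dict is nonempty after every insertion)
lemma pv_loopA_nonpos (X : Int) (hX : X ≤ 0) (l : List (Int × Int)) :
    ∀ data : PySem.Dict PvKey Int, pvLoopA X l data = -1 := by
  induction l with
  | nil => intro data; simp [pvLoopA]
  | cons p rest ih =>
    intro data
    obtain ⟨i, v⟩ := p
    simp only [pvLoopA]
    split_ifs with h1 h2 h2
    · exfalso
      have hk : PvKey.ofInt v ∈ data.keys :=
        (PySem.Dict.contains_iff_mem_keys data (PvKey.ofInt v)).mp h1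
      have : 0 < data.keys.length := List.length_pos_of_mem hk
      rw [pv_size_keys] at h2
      omega
    · exact ih _
    · exfalso
      rw [PySem.Dict.size_insert] at h2
      split_ifs at h2 with h3
      · have hk := (PySem.Dict.contains_iff_mem_keys _ _).mp h3
        have : 0 < data.keys.length := List.length_pos_of_mem hk
        rw [pv_size_keys] at h2
        omega
      · push_cast at h2
        omega
    · exact ih _

-- ===== VERDICT (by name: the statement is the Claim_ definition above) =====
theorem solution_spec : Claim_equal_solution := by
  intro X A _
  unfold Spec_solution solution solution_alt
  by_cases hX : 0 < X
  · rw [pv_loop_eq X (PySem.List.enumerate A) PySem.Dict.empty PySem.Set.empty []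
      (by rfl) (by rfl) (by simpa)]
    by_cases h1 : X ≤ ((pvLoopB (PySem.List.enumerate A) PySem.Set.empty []).length : Int)
    · rw [if_pos h1, if_pos ⟨hX, h1⟩]
    · rw [if_neg h1, if_neg (fun hc => h1 hc.2)]
  · rw [pv_loopA_nonpos X (by omega), if_neg (fun hc => hX hc.1)]
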